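-- pv_equiv track=rewrite | github.com/Jiffredteh/Text_Analytics_Application | Config/util.py | remove_consec
-- ===== SOURCE A (Python) =====
-- def remove_consec(text):
--     val = ""
--     i = 0
--     while(i < len(text)):
--         if(i < len(text) - 2 and
--            text[i] * 3 == text[i:i + 3]):
--             i += 3
--         else:
--             val += text[i]
--             i += 1
--     if (len(val) == len(text)):
--         return val
--     else:
--         return remove_consec(val)
-- ===== SOURCE B (Python) =====
-- def remove_consec(text):
--     st = []  # stack of [char, count], count in {1, 2}
--     for ch in text:
--         if st and st[-1][0] == ch:
--             if st[-1][1] == 2: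
--                 st.pop()        # run reached length 3: delete it
--             else:
--                 st[-1][1] += 1
--         else:
--             st.append([ch, 1])
--     return ''.join(c * k for c, k in st)
-- ===== Notes on version B (the rewrite author's own statement) =====
-- stated objective: faster
-- what changed: Replaced the repeat-until-fixpoint scan (rescanning the whole string each pass) by a single left-to-right pass with a stack of (char, count mod 3) pairs that pops a run when its count reaches 3.
import Mathlib
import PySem

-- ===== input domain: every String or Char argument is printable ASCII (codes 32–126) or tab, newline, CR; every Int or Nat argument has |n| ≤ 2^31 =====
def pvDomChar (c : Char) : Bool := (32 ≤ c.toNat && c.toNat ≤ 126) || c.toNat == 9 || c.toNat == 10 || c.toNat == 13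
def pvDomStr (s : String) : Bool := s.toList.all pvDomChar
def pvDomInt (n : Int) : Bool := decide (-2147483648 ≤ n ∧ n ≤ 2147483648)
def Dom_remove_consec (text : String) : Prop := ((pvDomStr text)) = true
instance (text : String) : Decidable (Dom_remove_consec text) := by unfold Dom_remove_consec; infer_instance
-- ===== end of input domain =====

-- B replaces A's repeat-until-fixpoint rescanning with one stack pass (count mod 3); objective: faster.

-- ===== PORT A =====
-- A's while loop over index i, written as structural recursion on the suffix text[i:];
-- the branch test 'i < len(text) - 2 and text[i]*3 == text[i:i+3]' is 'suffix starts with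
-- three equal chars', 'val += text[i]' is the cons onto the recursive result.
def passA : List Char → List Char
  | [] => []
  | [a] => [a]
  | [a, b] => [a, b]
  | a :: b :: c :: r => if a = b ∧ b = c then passA r else a :: passA (b :: c :: r)

theorem passA_len_le (l : List Char) : (passA l).length ≤ l.length := by
  induction l using passA.induct with
  | case1 => simp [passA]
  | case2 => simp [passA]
  | case3 => simp [passA]
  | case4 a b c r h ih => simp only [passA, if_pos h, List.length_cons]; omega
  | case5 a b c r h ih =>
    simp only [passA, if_neg h]
    simp only [List.length_cons] at ih ⊢
    omega

-- 'if len(val) == len(text): return val else: return remove_consec(val)'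
def remove_consec_core (l : List Char) : List Char :=
  if (passA l).length = l.length then passA l else remove_consec_core (passA l)
termination_by l.length
decreasing_by exact Nat.lt_of_le_of_ne (passA_len_le l) (by assumption)

def remove_consec (text : String) : String := String.ofList (remove_consec_core text.toList)

-- ===== PORT B =====
-- stack head = Python's st[-1] (top); count is 1 or 2, a run is deleted when it would reach 3
def stepB (st : List (Char × Nat)) (ch : Char) : List (Char × Nat) :=
  match st with
  | (d, k) :: rest => if d = ch then (if k = 2 then rest else (d, k + 1) :: rest) else (ch, 1) :: (d, k) :: rest
  | [] => [(ch, 1)]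

-- ''.join(c*k for c,k in st): st iterated bottom-to-top, head of our list is the top
def renderB : List (Char × Nat) → List Char
  | [] => []
  | (c, k) :: st => renderB st ++ List.replicate k c

def remove_consec_alt (text : String) : String :=
  String.ofList (renderB (text.toList.foldl stepB []))

-- ===== PRECONDITION & SPEC =====
def Spec_remove_consec (text : String) (out : String) : Prop := out = remove_consec_alt text
instance (text : String) (out : String) : Decidable (Spec_remove_consec text out) := by unfold Spec_remove_consec; infer_instance

-- ===== CLAIM (what is proved, stated in full; the proofs are below) =====
def Claim_equal_remove_consec : Prop := ∀ (text : String), Dom_remove_consec text → Spec_remove_consec text (remove_consec text)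

-- ===== LEMMAS AND PROOFS =====

-- stack invariant: adjacent entries carry different chars, every count is 1 or 2
def InvS : List (Char × Nat) → Prop
  | [] => True
  | [(_, k)] => k = 1 ∨ k = 2
  | (c, k) :: (d, j) :: st => (k = 1 ∨ k = 2) ∧ c ≠ d ∧ InvS ((d, j) :: st)

theorem invS_step (st : List (Char × Nat)) (ch : Char) (h : InvS st) : InvS (stepB st ch) := by
  match st with
  | [] => simp [stepB, InvS]
  | [(d, k)] =>
    by_cases hd : d = ch
    · by_cases hk2 : k = 2
      · simp [stepB, hd, hk2, InvS]
      · rcases h with h | h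
        · simp [stepB, hd, h, InvS]
        · exact absurd h hk2
    · simp only [stepB, if_neg hd]
      exact ⟨Or.inl rfl, fun he => hd he.symm, h⟩
  | (c, k) :: (d, j) :: st =>
    obtain ⟨hk, hne, hrest⟩ := h
    by_cases hc : c = ch
    · by_cases hk2 : k = 2
      · simpa [stepB, hc, hk2] using hrest
      · simp only [stepB, if_pos hc, if_neg hk2]
        exact ⟨by omega, hne, hrest⟩
    · simp only [stepB, if_neg hc]
      exact ⟨Or.inl rfl, fun he => hc he.symm, hk, hne, hrest⟩

-- pushing three equal chars onto a well-formed stack leaves it unchanged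
theorem step3 (st : List (Char × Nat)) (c : Char) (h : InvS st) :
    stepB (stepB (stepB st c) c) c = st := by
  match st with
  | [] => simp [stepB]
  | [(d, k)] =>
    by_cases hdc : d = c
    · subst hdc
      rcases h with h | h <;> subst h <;> simp [stepB]
    · simp [stepB, hdc]
  | (d, k) :: (e, j) :: rest =>
    obtain ⟨hk, hne, _⟩ := h
    have hne' : e ≠ d := fun he => hne he.symm
    by_cases hdc : d = c
    · subst hdc
      rcases hk with h1 | h1 <;> subst h1 <;> simp [stepB, hne']
    · simp [stepB, hdc]

-- folding A's one pass equals folding the original string (from any well-formed stack)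
theorem fold_passA (l : List Char) (st : List (Char × Nat)) (h : InvS st) :
    List.foldl stepB st (passA l) = List.foldl stepB st l := by
  induction l using passA.induct generalizing st with
  | case1 => rfl
  | case2 => rfl
  | case3 => rfl
  | case4 a b c r heq ih =>
    obtain ⟨h1, h2⟩ := heq; subst h1; subst h2
    simp only [passA, and_self, if_true, List.foldl_cons]
    rw [show stepB (stepB (stepB st a) a) a = st from step3 st a h]
    exact ih st h
  | case5 a b c r heq ih =>
    simp only [passA, if_neg heq, List.foldl_cons]
    exact ih (stepB st a) (invS_step st a h)

-- triple detector
def hasTriple : List Char → Bool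
  | a :: b :: c :: r => (a = b ∧ b = c : Bool) || hasTriple (b :: c :: r)
  | _ => false

theorem hasTriple_cons (a : Char) (l : List Char) (h : hasTriple l = true) :
    hasTriple (a :: l) = true := by
  match l with
  | [] => simp [hasTriple] at h
  | [x] => simp [hasTriple] at h
  | [x, y] => simp [hasTriple] at h
  | x :: y :: z :: r => simp [hasTriple] at h ⊢; tauto

theorem hasTriple_mid (u v : List Char) (c : Char) :
    hasTriple (u ++ c :: c :: c :: v) = true := by
  induction u with
  | nil => simp [hasTriple]
  | cons a u ih => exact hasTriple_cons a _ ih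

-- a pass that removes nothing means no triple exists
theorem passA_fix_noTriple (l : List Char) (h : passA l = l) : hasTriple l = false := by
  induction l using passA.induct with
  | case1 => rfl
  | case2 => rfl
  | case3 => rfl
  | case4 a b c r heq ih =>
    exfalso
    have hl := passA_len_le r
    simp only [passA, if_pos heq] at h
    have := congrArg List.length h
    simp at this
    omega
  | case5 a b c r heq ih =>
    simp only [passA, if_neg heq, List.cons.injEq] at h
    have := ih h.2
    simp [hasTriple, this]
    tauto

-- on a triple-free string the stack never pops, so it just spells the input back out
theorem render_noTriple (l : List Char) (st : List (Char × Nat)) (h : InvS st)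
    (hnt : hasTriple (renderB st ++ l) = false) :
    renderB (List.foldl stepB st l) = renderB st ++ l := by
  induction l generalizing st with
  | nil => simp
  | cons ch tl ih =>
    have key : renderB (stepB st ch) = renderB st ++ [ch] ∧ InvS (stepB st ch) := by
      refine ⟨?_, invS_step st ch h⟩
      match st with
      | [] => simp [stepB, renderB]
      | (d, k) :: rest =>
        by_cases hdc : d = ch
        · subst hdc
          have hk2 : k ≠ 2 := by
            intro hk; subst hk
            have : hasTriple (renderB ((d, 2) :: rest) ++ d :: tl) = true := by
              have : renderB rest ++ List.replicate 2 d ++ d :: tl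
                  = renderB rest ++ d :: d :: d :: tl := by
                simp [List.replicate]
              simp only [renderB, this]
              exact hasTriple_mid _ _ d
            simp_all
          simp [stepB, hk2, renderB, List.replicate_succ']
        · simp [stepB, hdc, renderB]
    rw [List.foldl_cons, ih (stepB st ch) key.2 (by rw [key.1]; simpa using hnt)]
    rw [key.1]; simp

-- if a pass keeps the length, it kept every character
theorem passA_len_eq (l : List Char) (h : (passA l).length = l.length) : passA l = l := by
  induction l using passA.induct with
  | case1 => rfl
  | case2 => rfl
  | case3 => rfl
  | case4 a b c r heq ih =>
    exfalso
    have := passA_len_le r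
    simp only [passA, if_pos heq] at h
    simp at h
    omega
  | case5 a b c r heq ih =>
    simp only [passA, if_neg heq] at h ⊢
    simp at h
    rw [ih h]

theorem core_eq_stack (l : List Char) :
    remove_consec_core l = renderB (List.foldl stepB [] l) := by
  induction l using remove_consec_core.induct with
  | case1 l heq =>
    rw [remove_consec_core, if_pos heq]
    have hfix : passA l = l := passA_len_eq l heq
    have hnt : hasTriple l = false := passA_fix_noTriple l hfix
    rw [hfix]
    have hr := render_noTriple l [] trivial (by simpa [renderB] using hnt)
    rw [hr]
    simp [renderB]
  | case2 l hne ih =>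
    rw [remove_consec_core, if_neg hne, ih, fold_passA l [] trivial]

-- ===== VERDICT (by name: the statement is the Claim_ definition above) =====
theorem remove_consec_spec : Claim_equal_remove_consec := by
  intro text _
  unfold Spec_remove_consec remove_consec remove_consec_alt
  rw [core_eq_stack]
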